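-- pv_equiv track=rewrite | github.com/michaeldwong/madeye | madeye_utils.py | parse_orientation_string
-- ===== SOURCE A (Python) =====
-- def parse_orientation_string(orientation):
--     final_vec = []
--     split_orientation = orientation.split("-")
--     add_negative = False
--     for s in split_orientation:
--         if len(s) == 0:
--             add_negative = True;
--         elif add_negative:
--             final_vec.append(f'-{s}')
--         else:
--             final_vec.append(s)
--     return final_vec
-- ===== SOURCE B (Python) =====
-- def parse_orientation_string(orientation):
--     split = orientation.split("-")
--     idx = split.index("") if "" in split else len(split)
--     return split[:idx] + ['-' + t for t in split[idx:] if t]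
-- ===== Notes on version B (the rewrite author's own statement) =====
-- stated objective: simpler
-- what changed: Replaces the stateful loop with a latch flag by locating the first empty token once and building the result as the unchanged prefix plus a filtered, negated suffix.
import Mathlib
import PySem

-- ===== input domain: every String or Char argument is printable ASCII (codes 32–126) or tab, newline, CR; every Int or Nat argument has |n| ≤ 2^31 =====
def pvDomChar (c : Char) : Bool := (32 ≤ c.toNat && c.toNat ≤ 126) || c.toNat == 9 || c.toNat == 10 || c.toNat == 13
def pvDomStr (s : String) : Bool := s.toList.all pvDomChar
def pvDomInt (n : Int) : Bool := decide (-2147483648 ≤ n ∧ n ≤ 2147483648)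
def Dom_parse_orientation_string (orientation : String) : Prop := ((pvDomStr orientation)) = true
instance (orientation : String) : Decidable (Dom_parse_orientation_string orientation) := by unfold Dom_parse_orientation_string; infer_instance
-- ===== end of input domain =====

-- B replaces A's stateful latch-flag loop with: find the first empty token, keep the prefix, negate the filtered suffix (simpler decomposition).

-- ===== PORT A =====
-- the loop body: state = (add_negative, final_vec)
def pvStepA (st : Bool × List String) (s : String) : Bool × List String :=
  if PySem.Str.len s == 0 then (true, st.2)
  else if st.1 then (st.1, st.2 ++ ["-" ++ s])
  else (st.1, st.2 ++ [s])

def parse_orientation_string (orientation : String) : List String :=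
  -- orientation.split("-"): sep ≠ "" so split? is some; getD [] never fires
  let split_orientation := (PySem.Str.split? orientation "-").getD []
  (split_orientation.foldl pvStepA (false, ([] : List String))).2

-- ===== PORT B =====
def parse_orientation_string_alt (orientation : String) : List String :=
  let split := (PySem.Str.split? orientation "-").getD []
  -- idx = split.index("") if "" in split else len(split)
  let idx := (PySem.List.index? split "").getD split.length
  -- split[:idx] with 0 ≤ idx ≤ len is List.take; split[idx:] is List.drop
  split.take idx ++ ((split.drop idx).filter (fun t => t ≠ "")).map (fun t => "-" ++ t)

-- ===== PRECONDITION & SPEC =====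
def Spec_parse_orientation_string (orientation : String) (out : List String) : Prop := out = parse_orientation_string_alt orientation
instance (orientation : String) (out : List String) : Decidable (Spec_parse_orientation_string orientation out) := by unfold Spec_parse_orientation_string; infer_instance

-- ===== CLAIM (what is proved, stated in full; the proofs are below) =====
def Claim_equal_parse_orientation_string : Prop := ∀ (orientation : String), Dom_parse_orientation_string orientation → Spec_parse_orientation_string orientation (parse_orientation_string orientation)

-- ===== LEMMAS AND PROOFS =====

-- what B computes on a token list
def pvAltOf (l : List String) : List String :=
  let idx := (PySem.List.index? l "").getD l.length
  l.take idx ++ ((l.drop idx).filter (fun t => t ≠ "")).map (fun t => "-" ++ t)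

theorem pvFoldTrue (l acc : List String) :
    l.foldl pvStepA (true, acc) =
      (true, acc ++ (l.filter (fun t => t ≠ "")).map (fun t => "-" ++ t)) := by
  induction l generalizing acc with
  | nil => simp
  | cons h t ih =>
    by_cases hh : h = ""
    · simp [List.foldl_cons, pvStepA, hh, ih]
    · simp [List.foldl_cons, pvStepA, hh, ih]

theorem pvFoldFalse (l acc : List String) :
    (l.foldl pvStepA (false, acc)).2 = acc ++ pvAltOf l := by
  induction l generalizing acc with
  | nil => simp [pvAltOf]
  | cons h t ih =>
    by_cases hh : h = ""
    · subst hh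
      have hidx : PySem.List.index? ("" :: t) "" = some 0 :=
        PySem.List.index?_cons_self _ _
      simp only [pvAltOf, hidx, Option.getD_some, List.take_zero, List.drop_zero,
        List.nil_append, List.foldl_cons]
      have hstep : pvStepA (false, acc) "" = (true, acc) := by
        simp [pvStepA]
      rw [hstep, pvFoldTrue]
      simp
    · rw [List.foldl_cons]
      have hstep : pvStepA (false, acc) h = (false, acc ++ [h]) := by
        simp [pvStepA, hh]
      rw [hstep, ih]
      have hidx : ((PySem.List.index? (h :: t) "").getD (h :: t).length)
          = ((PySem.List.index? t "").getD t.length) + 1 := by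
        rw [PySem.List.index?_cons_of_ne t hh]
        cases PySem.List.index? t "" <;> simp
      simp only [pvAltOf, hidx, List.take_succ_cons, List.drop_succ_cons]
      simp

-- ===== VERDICT (by name: the statement is the Claim_ definition above) =====
theorem parse_orientation_string_spec : Claim_equal_parse_orientation_string := by
  intro orientation _
  unfold Spec_parse_orientation_string parse_orientation_string parse_orientation_string_alt
  rw [pvFoldFalse]
  rfl
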